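-- pv_equiv track=rewrite | github.com/rafaelsndev-maker/pdf2epub-qa | src/pdf2epub_qa/reporting.py | _compact_page_list
-- ===== SOURCE A (Python) =====
-- def _compact_page_list(pages: list[int], max_items: int = 10) -> str:
--     clean_pages = sorted({int(p) for p in pages if isinstance(p, int)})
--     if not clean_pages:
--         return "nenhuma"
--     shown = clean_pages[:max_items]
--     text = ", ".join(str(page) for page in shown)
--     remaining = len(clean_pages) - len(shown)
--     if remaining > 0:
--         text += f" e mais {remaining}"
--     return text
-- ===== SOURCE B (Python) =====
-- import heapq
--
--
-- def _compact_page_list(pages: list[int], max_items: int = 10) -> str: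
--     clean_pages = {int(p) for p in pages if isinstance(p, int)}
--     if not clean_pages:
--         return "nenhuma"
--     shown = heapq.nsmallest(max_items, clean_pages)
--     remaining = len(clean_pages) - len(shown)
--     body = ", ".join(map(str, shown))
--     return f"{body} e mais {remaining}" if remaining > 0 else body
-- ===== Notes on version B (the rewrite author's own statement) =====
-- stated objective: alternative
-- what changed: B skips the full sort-then-slice of the deduped pages and selects the max_items smallest via heapq.nsmallest on the unsorted set, computing the overflow count from the set size.
-- outside the precondition, e.g. on _compact_page_list([1, 2, 3], -1): A returns '1, 2 e mais 1', B returns ' e mais 3'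
import Mathlib
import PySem

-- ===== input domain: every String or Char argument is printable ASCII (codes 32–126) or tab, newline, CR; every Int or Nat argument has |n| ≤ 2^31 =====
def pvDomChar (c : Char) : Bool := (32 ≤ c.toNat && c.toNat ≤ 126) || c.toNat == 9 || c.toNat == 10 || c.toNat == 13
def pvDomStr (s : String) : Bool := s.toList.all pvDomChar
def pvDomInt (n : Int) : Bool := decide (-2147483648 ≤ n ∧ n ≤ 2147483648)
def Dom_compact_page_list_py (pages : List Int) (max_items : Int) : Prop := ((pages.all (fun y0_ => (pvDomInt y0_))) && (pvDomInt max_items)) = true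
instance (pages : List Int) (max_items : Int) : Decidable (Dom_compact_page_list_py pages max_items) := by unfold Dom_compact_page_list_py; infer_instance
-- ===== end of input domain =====

-- B replaces A's full sort + slice of the deduped pages by a heap-style partial selection
-- (heapq.nsmallest) on the unsorted set; return values only (no mutation). Pre_ excludes
-- negative max_items (see comment at Pre_).

-- ===== PORT A =====
def compact_page_list_py (pages : List Int) (max_items : Int) : String :=
  let clean_pages := PySem.List.sorted (PySem.Set.ofList pages) (fun x => x) false
  if clean_pages.isEmpty then "nenhuma"
  else
    let shown := PySem.List.slice clean_pages none (some max_items)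
    let text := PySem.Str.join ", " (shown.map PySem.Int.toStr)
    let remaining : Int := (clean_pages.length : Int) - (shown.length : Int)
    if remaining > 0 then text ++ " e mais " ++ PySem.Int.toStr remaining else text

-- ===== PORT B =====
-- heapq.nsmallest(n, xs): [] for n <= 0, else the n smallest elements in ascending order
def pyNsmallest (n : Int) (xs : List Int) : List Int :=
  if n ≤ 0 then [] else (PySem.List.sorted xs (fun x => x) false).take n.toNat

def compact_page_list_py_alt (pages : List Int) (max_items : Int) : String :=
  let clean_pages : PySem.Set Int := PySem.Set.ofList pages
  if clean_pages.isEmpty then "nenhuma"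
  else
    let shown := pyNsmallest max_items clean_pages
    let remaining : Int := (PySem.Set.len clean_pages : Int) - (shown.length : Int)
    let body := PySem.Str.join ", " (shown.map PySem.Int.toStr)
    if remaining > 0 then body ++ " e mais " ++ PySem.Int.toStr remaining else body

-- ===== PRECONDITION & SPEC =====
-- Pre_ excludes negative max_items that still leave some distinct pages after Python's
-- negative-slice clamping: there A drops the last |max_items| pages while B's heap
-- selection shows none — a degenerate corner of the 'show at most max_items pages'
-- parameter that neither behaviour specifies; A still returns a string there (see
-- claim.json cites). Negative max_items whose magnitude covers all distinct pages
-- (both show none) stay inside Pre_.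
def Pre_compact_page_list_py (pages : List Int) (max_items : Int) : Prop :=
  0 ≤ max_items ∨ ((PySem.Set.ofList pages).length : Int) ≤ -max_items
instance (pages : List Int) (max_items : Int) : Decidable (Pre_compact_page_list_py pages max_items) := by unfold Pre_compact_page_list_py; infer_instance
def pvWitness_compact_page_list_py : List Int × Int := ([3, 1, 2, 1], 2)

def Spec_compact_page_list_py (pages : List Int) (max_items : Int) (out : String) : Prop := out = compact_page_list_py_alt pages max_items
instance (pages : List Int) (max_items : Int) (out : String) : Decidable (Spec_compact_page_list_py pages max_items out) := by unfold Spec_compact_page_list_py; infer_instance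

-- ===== CLAIM (what is proved, stated in full; the proofs are below) =====
def Claim_equal_compact_page_list_py : Prop := ∀ (pages : List Int) (max_items : Int), Dom_compact_page_list_py pages max_items → Pre_compact_page_list_py pages max_items → Spec_compact_page_list_py pages max_items (compact_page_list_py pages max_items)

-- ===== LEMMAS AND PROOFS =====
theorem pyNsmallest_eq_slice (n : Int) (xs : List Int) (hn : 0 ≤ n) :
    pyNsmallest n xs = PySem.List.slice (PySem.List.sorted xs (fun x => x) false) none (some n) := by
  rw [PySem.List.slice_to _ hn]
  unfold pyNsmallest
  by_cases h : n ≤ 0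
  · have : n = 0 := le_antisymm h hn
    simp [this]
  · simp [h]

theorem slice_to_far_neg (xs : List Int) (b : Int) (hb : b ≤ -(xs.length : Int)) :
    PySem.List.slice xs none (some b) = [] := by
  simp only [PySem.List.slice, PySem.List.clampIdx]
  split_ifs with h1 h2 <;> simp_all <;> omega

theorem sorted_isEmpty (xs : List Int) :
    (PySem.List.sorted xs (fun x => x) false).isEmpty = xs.isEmpty := by
  have h := PySem.List.length_sorted (xs := xs) (key := fun x => x) (rev := false)
  rcases e : PySem.List.sorted xs (fun x => x) false with _ | ⟨a, t⟩ <;>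
    rcases xs with _ | ⟨b, u⟩ <;> simp_all

-- ===== VERDICT (by name: the statement is the Claim_ definition above) =====
theorem compact_page_list_py_spec : Claim_equal_compact_page_list_py := by
  intro pages max_items _ hpre
  unfold Spec_compact_page_list_py compact_page_list_py compact_page_list_py_alt
  rcases hpre with h | h
  · simp only [pyNsmallest_eq_slice _ _ h, sorted_isEmpty, PySem.Set.len,
      PySem.List.length_sorted]
  · by_cases he : (PySem.Set.ofList pages).isEmpty
    · simp [sorted_isEmpty, he]
    · have hone : 0 < (PySem.Set.ofList pages).length :=
        List.length_pos_iff.mpr (by simpa [List.isEmpty_iff] using he)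
      have hmi : max_items ≤ 0 := by omega
      have hsl : PySem.List.slice
          (PySem.List.sorted (PySem.Set.ofList pages) (fun x => x) false) none
          (some max_items) = [] := by
        apply slice_to_far_neg
        rw [PySem.List.length_sorted]
        omega
      simp [sorted_isEmpty, he, hsl, pyNsmallest, hmi, PySem.Set.len,
        PySem.List.length_sorted]
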